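-- pv_equiv track=rewrite | github.com/testxxxxxxxxx/python_coding_problems | main26.py | solution
-- ===== SOURCE A (Python) =====
-- def solution(W: str, S: str) -> list:
--
--     result: list = []
--     revW: str = W[::-1]
--
--     for i in range(len(S)):
--
--         if W == S[i: i + len(W)]:
--             result.append(i)
--         elif revW == S[i: i + len(W)]:
--             result.append(i)
--
--     return result
-- ===== SOURCE B (Python) =====
-- def solution(W: str, S: str) -> list:
--     # Two separate occurrence scans (W and reversed W) merged as sorted index lists.
--     revW = ''.join(reversed(W))
--     occW = [i for i in range(len(S)) if S.startswith(W, i)]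
--     occR = [i for i in range(len(S)) if S.startswith(revW, i)]
--     res = []
--     a = b = 0
--     while a < len(occW) and b < len(occR):
--         x, y = occW[a], occR[b]
--         if x < y:
--             res.append(x); a += 1
--         elif y < x:
--             res.append(y); b += 1
--         else:
--             res.append(x); a += 1; b += 1
--     res.extend(occW[a:])
--     res.extend(occR[b:])
--     return res
-- ===== Notes on version B (the rewrite author's own statement) =====
-- stated objective: alternative
-- what changed: B computes the occurrence index lists of W and of reversed(W) in two separate startswith scans and two-pointer-merges the two ascending lists (deduplicating), instead of A's single loop that allocates and compares two fresh slices at every position.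
import Mathlib
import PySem

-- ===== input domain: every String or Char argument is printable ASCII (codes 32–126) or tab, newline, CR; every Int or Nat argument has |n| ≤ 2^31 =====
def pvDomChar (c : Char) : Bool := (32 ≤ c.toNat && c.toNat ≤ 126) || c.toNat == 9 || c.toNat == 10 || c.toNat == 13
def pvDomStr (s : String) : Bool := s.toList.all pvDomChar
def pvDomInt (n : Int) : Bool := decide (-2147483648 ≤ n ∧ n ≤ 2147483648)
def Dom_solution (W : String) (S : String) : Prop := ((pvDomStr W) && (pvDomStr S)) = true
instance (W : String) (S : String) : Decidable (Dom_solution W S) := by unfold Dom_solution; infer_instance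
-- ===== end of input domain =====

-- B: two separate occurrence scans merged as sorted lists, instead of A's single two-slice-comparison loop; same asymptotic cost (objective: alternative).

-- ===== PORT A =====
def solution (W : String) (S : String) : List Int :=
  let s := S.toList
  let w := W.toList
  let revW := (PySem.List.slice? w none none (-1)).getD []   -- W[::-1]; step = -1 ≠ 0, never none
  (PySem.List.pyRange 0 (s.length : Int) 1).foldl
    (fun result i =>
      if w = PySem.List.slice s (some i) (some (i + (w.length : Int))) then result ++ [i]
      else if revW = PySem.List.slice s (some i) (some (i + (w.length : Int))) then result ++ [i]
      else result) []

-- ===== PORT B =====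
-- merge of the two ascending index lists (Source B's two-pointer while loop, as structural recursion)
def mergeU : List Int → List Int → List Int
  | [], b => b
  | a, [] => a
  | x :: xs, y :: ys =>
      if x < y then x :: mergeU xs (y :: ys)
      else if y < x then y :: mergeU (x :: xs) ys
      else x :: mergeU xs ys

-- S.startswith(P, i) with 0 ≤ i < len(S) is exactly: P is a prefix of the suffix of S at i (ported by hand, exact on that range)
def solution_alt (W : String) (S : String) : List Int :=
  let s := S.toList
  let w := W.toList
  let revW := w.reverse   -- ''.join(reversed(W))
  mergeU
    ((PySem.List.pyRange 0 (s.length : Int) 1).filter (fun i => PySem.Chars.startswith (s.drop i.toNat) w))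
    ((PySem.List.pyRange 0 (s.length : Int) 1).filter (fun i => PySem.Chars.startswith (s.drop i.toNat) revW))

-- ===== PRECONDITION & SPEC =====
def Spec_solution (W : String) (S : String) (out : List Int) : Prop := out = solution_alt W S
instance (W : String) (S : String) (out : List Int) : Decidable (Spec_solution W S out) := by unfold Spec_solution; infer_instance

-- ===== CLAIM (what is proved, stated in full; the proofs are below) =====
def Claim_equal_solution : Prop := ∀ (W : String) (S : String), Dom_solution W S → Spec_solution W S (solution W S)

-- ===== LEMMAS AND PROOFS =====

theorem mergeU_nil (a : List Int) : mergeU a [] = a := by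
  cases a <;> simp [mergeU]

theorem mergeU_cons_left (x : Int) (as b : List Int) (h : ∀ y ∈ b, x < y) :
    mergeU (x :: as) b = x :: mergeU as b := by
  cases b with
  | nil => simp [mergeU_nil]
  | cons y ys =>
      have hxy : x < y := h y (by simp)
      simp [mergeU, hxy]

theorem mergeU_cons_right (x : Int) (a bs : List Int) (h : ∀ y ∈ a, x < y) :
    mergeU a (x :: bs) = x :: mergeU a bs := by
  cases a with
  | nil => simp [mergeU]
  | cons y ys =>
      have hxy : x < y := h y (by simp)
      simp [mergeU, hxy, not_lt_of_gt hxy]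

theorem mergeU_filter (p q : Int → Bool) (l : List Int) (hl : l.Pairwise (· < ·)) :
    mergeU (l.filter p) (l.filter q) = l.filter (fun x => p x || q x) := by
  induction l with
  | nil => simp [mergeU]
  | cons x xs ih =>
      have hx : ∀ y ∈ xs, x < y := (List.pairwise_cons.mp hl).1
      have hxs := (List.pairwise_cons.mp hl).2
      have hfy : ∀ (r : Int → Bool), ∀ y ∈ xs.filter r, x < y :=
        fun r y hy => hx y (List.mem_of_mem_filter hy)
      cases hp : p x <;> cases hq : q x <;> simp only [List.filter_cons, hp, hq,
        Bool.or_false, Bool.or_true, Bool.or_self, Bool.false_eq_true, if_false, if_true]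
      · exact ih hxs
      · rw [mergeU_cons_right x _ _ (hfy p), ih hxs]
      · rw [mergeU_cons_left x _ _ (hfy q), ih hxs]
      · simp [mergeU, ih hxs]

-- slice-at-i equality is prefix-of-suffix (for 0 ≤ i)
theorem slice_eq_iff_prefix (s p : List Char) (i : Int) (hi : 0 ≤ i) :
    (p = PySem.List.slice s (some i) (some (i + (p.length : Int)))) ↔ p <+: s.drop i.toNat := by
  rw [PySem.List.slice_toNat s hi (by positivity)]
  have h : (i + (p.length : Int)).toNat - i.toNat = p.length := by omega
  rw [h]
  constructor
  · intro hp; rw [hp]; exact List.take_prefix _ _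
  · intro hp; exact List.prefix_iff_eq_take.mp hp

-- ===== VERDICT (by name: the statement is the Claim_ definition above) =====
theorem solution_spec : Claim_equal_solution := by
  intro W S _
  unfold Spec_solution solution solution_alt
  simp only []
  set s := S.toList
  set w := W.toList
  have hrev : (PySem.List.slice? w none none (-1)).getD [] = w.reverse := by
    rw [PySem.List.slice?_none_none_neg_one]; rfl
  rw [hrev]
  -- turn A's append-loop into a filter over the index range
  have hfold : ∀ (l : List Int) (init : List Int),
      l.foldl (fun result i =>
        if w = PySem.List.slice s (some i) (some (i + (w.length : Int))) then result ++ [i]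
        else if w.reverse = PySem.List.slice s (some i) (some (i + (w.length : Int))) then result ++ [i]
        else result) init
      = init ++ l.filter (fun i =>
          decide (w = PySem.List.slice s (some i) (some (i + (w.length : Int)))) ||
          decide (w.reverse = PySem.List.slice s (some i) (some (i + (w.length : Int))))) := by
    intro l
    induction l with
    | nil => simp
    | cons a l ih =>
        intro init
        simp only [List.foldl_cons, List.filter_cons]
        by_cases h1 : w = PySem.List.slice s (some a) (some (a + (w.length : Int)))
        · rw [if_pos h1, ih, decide_eq_true h1]; simp
        · by_cases h2 : w.reverse = PySem.List.slice s (some a) (some (a + (w.length : Int)))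
          · rw [if_neg h1, if_pos h2, ih, decide_eq_true h2]; simp
          · rw [if_neg h1, if_neg h2, ih, decide_eq_false h1, decide_eq_false h2]; simp
  rw [hfold, List.nil_append]
  clear hfold
  rw [mergeU_filter _ _ _ (PySem.List.pairwise_lt_pyRange_one 0 ((s.length : Int)))]
  apply List.filter_congr
  intro i hi
  have hi0 : 0 ≤ i := (PySem.List.mem_pyRange_one.mp hi).1
  have e1 := slice_eq_iff_prefix s w i hi0
  have e2 := slice_eq_iff_prefix s w.reverse i hi0
  rw [List.length_reverse] at e2
  rw [Bool.eq_iff_iff]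
  simp only [Bool.or_eq_true, decide_eq_true_eq, PySem.Chars.startswith_iff]
  rw [e1, e2]
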